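-- pv_equiv track=rewrite | github.com/bh1428/advent-of-code | 2025/aoc2025_day07_laboratories.py | part_1
-- ===== SOURCE A (Python) =====
-- def part_1(diagram: list[str]) -> int:
--     splits = 0
--     current_beams: set[int] = {diagram[0].find("S")}
--     for line in diagram[1:]:
--         new_beams: set[int] = set()
--         splitters = [index for index, char in enumerate(line) if char == "^"]
--         for beam in current_beams:
--             if beam in splitters:
--                 new_beams.update([beam - 1, beam + 1])
--                 splits += 1
--             else:
--                 new_beams.add(beam)
--         current_beams = new_beams
--     return splits
-- ===== SOURCE B (Python) =====
-- def part_1(diagram: list[str]) -> int: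
--     # Bitmask algorithm: beam positions are bits of one Python int; each row's
--     # splitters become a mask, so a row is processed with a few word operations
--     # instead of per-beam set manipulation.
--     start = diagram[0].find("S")
--     beams = 0 if start < 0 else 1 << start
--     splits = 0
--     for line in diagram[1:]:
--         mask = 0
--         for i, ch in enumerate(line):
--             if ch == "^":
--                 mask |= 1 << i
--         hits = beams & mask
--         splits += hits.bit_count()
--         beams = (beams ^ hits) | (hits >> 1) | (hits << 1)
--     return splits
-- ===== Notes on version B (the rewrite author's own statement) =====
-- stated objective: faster
-- what changed: Represents the set of beam positions as the bits of a single Python int and each row's splitter columns as a bitmask; a row is then processed with hits = beams & mask, bit_count() for the split count and shift/or/xor word operations to form the next beam set, replacing A's explicit per-beam loop with its list-membership scan over an explicit set of positions.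
import Mathlib
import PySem

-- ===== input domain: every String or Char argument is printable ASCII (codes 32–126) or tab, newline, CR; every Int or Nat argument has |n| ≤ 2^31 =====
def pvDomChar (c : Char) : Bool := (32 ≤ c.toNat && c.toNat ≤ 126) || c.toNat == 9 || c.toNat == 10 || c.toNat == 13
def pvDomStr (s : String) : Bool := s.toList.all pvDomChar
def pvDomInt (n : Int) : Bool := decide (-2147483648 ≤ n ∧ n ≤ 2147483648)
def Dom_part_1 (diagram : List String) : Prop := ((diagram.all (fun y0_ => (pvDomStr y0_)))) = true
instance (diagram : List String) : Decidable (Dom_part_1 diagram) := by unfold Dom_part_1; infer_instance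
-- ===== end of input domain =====

-- B replaces A's explicit set of beam positions and per-beam loop by a bitmask
-- representation: beams are the bits of one integer, each row is processed with
-- and/xor/shift word operations and a popcount; same return value.

-- ===== PORT A =====
def part_1 (diagram : List String) : Int :=
  -- splits = 0; current_beams = {diagram[0].find("S")}
  let front := PySem.List.pyGetD diagram 0 ""
  let fin := (PySem.List.slice diagram (some 1) none).foldl
    (fun (st : Int × PySem.Set Int) line =>
      -- splitters = [index for index, char in enumerate(line) if char == "^"]
      let splitters : List Int :=
        ((PySem.List.enumerate line.toList).filter (fun p => p.2 == '^')).map (·.1)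
      -- for beam in current_beams: …
      let inner := st.2.foldl
        (fun (acc : PySem.Set Int × Int) beam =>
          if beam ∈ splitters then
            (PySem.Set.update acc.1 [beam - 1, beam + 1], acc.2 + 1)
          else
            (PySem.Set.add acc.1 beam, acc.2))
        (PySem.Set.empty, st.1)
      (inner.2, inner.1))
    (0, PySem.Set.ofList [PySem.Str.find front "S"])
  fin.1

-- ===== PORT B =====
-- port of Python's int.bit_count() on a nonnegative int (exact on Nat)
def pvPopCount (n : Nat) : Nat :=
  if n = 0 then 0 else n % 2 + pvPopCount (n / 2)
decreasing_by exact Nat.div_lt_self (Nat.pos_of_ne_zero (by assumption)) one_lt_two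

def part_1_alt (diagram : List String) : Int :=
  let front := PySem.List.pyGetD diagram 0 ""
  -- start = diagram[0].find("S"); beams = 0 if start < 0 else 1 << start
  let start := PySem.Str.find front "S"
  let beams0 : Nat := if start < 0 then 0 else 1 <<< start.toNat
  let fin := (PySem.List.slice diagram (some 1) none).foldl
    (fun (st : Int × Nat) line =>
      -- mask = 0; for i, ch in enumerate(line): if ch == "^": mask |= 1 << i
      -- (enumerate indices are ≥ 0, so .toNat is exact)
      let mask : Nat := (PySem.List.enumerate line.toList).foldl
        (fun (m : Nat) p => if p.2 == '^' then m ||| (1 <<< p.1.toNat) else m) 0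
      -- hits = beams & mask; splits += hits.bit_count()
      let hits := st.2 &&& mask
      -- beams = (beams ^ hits) | (hits >> 1) | (hits << 1)
      (st.1 + (pvPopCount hits : Int), (st.2 ^^^ hits) ||| (hits >>> 1) ||| (hits <<< 1)))
    (0, beams0)
  fin.1

-- ===== PRECONDITION & SPEC =====
-- Pre_ excludes only the empty diagram, on which A raises IndexError at diagram[0].
def Pre_part_1 (diagram : List String) : Prop := diagram ≠ []
instance (diagram : List String) : Decidable (Pre_part_1 diagram) := by unfold Pre_part_1; infer_instance
def pvWitness_part_1 : List String := ["S..", ".^."]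

def Spec_part_1 (diagram : List String) (out : Int) : Prop := out = part_1_alt diagram
instance (diagram : List String) (out : Int) : Decidable (Spec_part_1 diagram out) := by unfold Spec_part_1; infer_instance

-- ===== CLAIM (what is proved, stated in full; the proofs are below) =====
def Claim_equal_part_1 : Prop := ∀ (diagram : List String), Dom_part_1 diagram → Pre_part_1 diagram → Spec_part_1 diagram (part_1 diagram)

-- ===== LEMMAS AND PROOFS =====

-- A's per-line step, named for the proofs (definitionally the step of part_1's fold).
def pvStepA (st : Int × PySem.Set Int) (line : String) : Int × PySem.Set Int :=
  let splitters : List Int :=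
    ((PySem.List.enumerate line.toList).filter (fun p => p.2 == '^')).map (·.1)
  let inner := st.2.foldl
    (fun (acc : PySem.Set Int × Int) beam =>
      if beam ∈ splitters then
        (PySem.Set.update acc.1 [beam - 1, beam + 1], acc.2 + 1)
      else
        (PySem.Set.add acc.1 beam, acc.2))
    (PySem.Set.empty, st.1)
  (inner.2, inner.1)

-- B's per-line step, named for the proofs.
def pvStepB (st : Int × Nat) (line : String) : Int × Nat :=
  let mask : Nat := (PySem.List.enumerate line.toList).foldl
    (fun (m : Nat) p => if p.2 == '^' then m ||| (1 <<< p.1.toNat) else m) 0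
  let hits := st.2 &&& mask
  (st.1 + (pvPopCount hits : Int), (st.2 ^^^ hits) ||| (hits >>> 1) ||| (hits <<< 1))

theorem part_1_eq_fold (diagram : List String) :
    part_1 diagram = ((PySem.List.slice diagram (some 1) none).foldl pvStepA
      (0, PySem.Set.ofList [PySem.Str.find (PySem.List.pyGetD diagram 0 "") "S"])).1 := rfl

theorem part_1_alt_eq_fold (diagram : List String) :
    part_1_alt diagram = ((PySem.List.slice diagram (some 1) none).foldl pvStepB
      (0, if PySem.Str.find (PySem.List.pyGetD diagram 0 "") "S" < 0 then 0
          else 1 <<< (PySem.Str.find (PySem.List.pyGetD diagram 0 "") "S").toNat)).1 := rfl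

-- the simulation relation: B's integer holds exactly the nonnegative beam positions of A
def pvRel (a : Int × PySem.Set Int) (b : Int × Nat) : Prop :=
  a.1 = b.1 ∧ a.2.Nodup ∧ (∀ x ∈ a.2, x < 0 ∨ b.2.testBit x.toNat = true)
    ∧ (∀ j : Nat, b.2.testBit j = true → (j : Int) ∈ a.2)

theorem pv_spl_nodup (line : String) :
    (((PySem.List.enumerate line.toList).filter (fun p => p.2 == '^')).map (·.1)).Nodup := by
  have h := PySem.List.pairwise_lt_enumerate (xs := line.toList) (s := 0)
  have h3 : ((((PySem.List.enumerate line.toList).filter (fun p => p.2 == '^')).map (·.1)).Pairwise (· < ·)) :=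
    List.pairwise_map.mpr (h.filter (fun p => p.2 == '^'))
  exact h3.imp ne_of_lt

theorem pv_spl_nonneg (line : String) :
    ∀ x ∈ (((PySem.List.enumerate line.toList).filter (fun p => p.2 == '^')).map (·.1)), 0 ≤ x := by
  intro x hx
  obtain ⟨p, hp, rfl⟩ := List.mem_map.mp hx
  obtain ⟨k, hk, hpe⟩ := (PySem.List.mem_enumerate_iff _ _ _).mp (List.mem_filter.mp hp).1
  subst hpe
  simp

theorem pv_foldA (spl : List Int) (cur : List Int) : ∀ (s0 : PySem.Set Int) (k : Int),
    s0.Nodup →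
    ((cur.foldl (fun (acc : PySem.Set Int × Int) beam =>
        if beam ∈ spl then (PySem.Set.update acc.1 [beam - 1, beam + 1], acc.2 + 1)
        else (PySem.Set.add acc.1 beam, acc.2)) (s0, k)).2
       = k + ((cur.filter (fun x => decide (x ∈ spl))).length : Int))
    ∧ (cur.foldl (fun (acc : PySem.Set Int × Int) beam =>
        if beam ∈ spl then (PySem.Set.update acc.1 [beam - 1, beam + 1], acc.2 + 1)
        else (PySem.Set.add acc.1 beam, acc.2)) (s0, k)).1.Nodup
    ∧ ∀ x, (x ∈ (cur.foldl (fun (acc : PySem.Set Int × Int) beam =>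
        if beam ∈ spl then (PySem.Set.update acc.1 [beam - 1, beam + 1], acc.2 + 1)
        else (PySem.Set.add acc.1 beam, acc.2)) (s0, k)).1 ↔ x ∈ s0 ∨ ∃ y ∈ cur,
            (y ∈ spl ∧ (x = y - 1 ∨ x = y + 1)) ∨ (y ∉ spl ∧ x = y)) := by
  induction cur with
  | nil => intro s0 k h; exact ⟨by simp, h, by simp⟩
  | cons c t ih =>
    intro s0 k h
    by_cases hc : c ∈ spl
    · have h' : (PySem.Set.update s0 [c - 1, c + 1]).Nodup := PySem.Set.nodup_update _ _ h
      obtain ⟨e1, e2, e3⟩ := ih (PySem.Set.update s0 [c - 1, c + 1]) (k + 1) h'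
      refine ⟨?_, ?_, ?_⟩
      · rw [List.foldl_cons, if_pos hc, e1, List.filter_cons]
        simp only [hc, decide_true, if_pos, List.length_cons]
        push_cast
        ring
      · rw [List.foldl_cons, if_pos hc]; exact e2
      · intro x
        rw [List.foldl_cons, if_pos hc, e3 x]
        simp only [PySem.Set.mem_update, List.mem_cons, List.not_mem_nil, or_false]
        constructor
        · rintro (⟨hs | hx⟩ | ⟨y, hy, hp⟩)
          · exact Or.inl hs
          · exact Or.inr ⟨c, Or.inl rfl, Or.inl ⟨hc, by tauto⟩⟩
          · exact Or.inr ⟨y, Or.inr hy, hp⟩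
        · rintro (hs | ⟨y, hy, hp⟩)
          · exact Or.inl (Or.inl hs)
          · rcases hy with rfl | hy'
            · rcases hp with ⟨_, hx⟩ | ⟨hns, _⟩
              · exact Or.inl (Or.inr (by tauto))
              · exact absurd hc hns
            · exact Or.inr ⟨y, hy', hp⟩
    · have h' : (PySem.Set.add s0 c).Nodup := PySem.Set.nodup_add _ _ h
      obtain ⟨e1, e2, e3⟩ := ih (PySem.Set.add s0 c) k h'
      refine ⟨?_, ?_, ?_⟩
      · rw [List.foldl_cons, if_neg hc, e1, List.filter_cons]
        simp [hc]
      · rw [List.foldl_cons, if_neg hc]; exact e2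
      · intro x
        rw [List.foldl_cons, if_neg hc, e3 x]
        simp only [PySem.Set.mem_add, List.mem_cons]
        constructor
        · rintro (⟨hs | hx⟩ | ⟨y, hy, hp⟩)
          · exact Or.inl hs
          · exact Or.inr ⟨c, Or.inl rfl, Or.inr ⟨hc, hx⟩⟩
          · exact Or.inr ⟨y, Or.inr hy, hp⟩
        · rintro (hs | ⟨y, hy, hp⟩)
          · exact Or.inl (Or.inl hs)
          · rcases hy with rfl | hy'
            · rcases hp with ⟨hys, _⟩ | ⟨_, hx⟩
              · exact absurd hys hc
              · exact Or.inl (Or.inr hx)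
            · exact Or.inr ⟨y, hy', hp⟩

-- the mask built by B's inner fold has exactly the splitter columns as set bits
theorem pv_mask_bits_aux (l : List (Int × Char)) (hnn : ∀ p ∈ l, 0 ≤ p.1) :
    ∀ (m0 : Nat) (j : Nat),
      ((l.foldl (fun (m : Nat) p => if p.2 == '^' then m ||| (1 <<< p.1.toNat) else m) m0).testBit j
        ↔ m0.testBit j ∨ (j : Int) ∈ (l.filter (fun p => p.2 == '^')).map (·.1)) := by
  induction l with
  | nil => intro m0 j; simp
  | cons p t ih =>
    intro m0 j
    have hp0 : 0 ≤ p.1 := hnn p (List.mem_cons_self ..)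
    have ht : ∀ q ∈ t, 0 ≤ q.1 := fun q hq => hnn q (List.mem_cons_of_mem _ hq)
    by_cases hc : p.2 == '^'
    · rw [List.foldl_cons, if_pos hc, ih ht]
      have h1 : (m0 ||| (1 <<< p.1.toNat)).testBit j = (m0.testBit j || decide (p.1.toNat = j)) := by
        rw [Nat.testBit_or, Nat.shiftLeft_eq, one_mul, Nat.testBit_two_pow]
      rw [List.filter_cons, if_pos hc, List.map_cons, List.mem_cons]
      constructor
      · rintro (h | h)
        · rcases Bool.or_eq_true_iff.mp (h1 ▸ h) with h' | h'
          · exact Or.inl h'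
          · exact Or.inr (Or.inl (by have := of_decide_eq_true h'; omega))
        · exact Or.inr (Or.inr h)
      · rintro (h | h | h)
        · refine Or.inl ?_
          rw [h1, h]
          simp
        · refine Or.inl ?_
          rw [h1]
          have hj' : p.1.toNat = j := by omega
          rw [hj']
          simp
        · exact Or.inr h
    · rw [List.foldl_cons, if_neg hc, ih ht, List.filter_cons, if_neg hc]

-- popcount counts the set bits
theorem pv_pop_eq_card (m : Nat) : ∀ (s : Finset ℕ), (∀ j, m.testBit j = true ↔ j ∈ s) →
    pvPopCount m = s.card := by
  induction m using Nat.strong_induction_on with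
  | _ m ih =>
    intro s hs
    by_cases hm : m = 0
    · subst hm
      have : s = ∅ := by
        ext j; simp [← hs j]
      rw [this, pvPopCount]; simp
    · have hlt : m / 2 < m := Nat.div_lt_self (Nat.pos_of_ne_zero hm) one_lt_two
      have hs' : ∀ j, (m / 2).testBit j = true ↔ j ∈ (s.erase 0).image (· - 1) := by
        intro j
        rw [Nat.testBit_div_two, hs (j + 1)]
        constructor
        · intro h
          exact Finset.mem_image.mpr ⟨j + 1, Finset.mem_erase.mpr ⟨by omega, h⟩, by omega⟩
        · intro h
          obtain ⟨a, ha, hae⟩ := Finset.mem_image.mp h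
          obtain ⟨ha0, has⟩ := Finset.mem_erase.mp ha
          have : a = j + 1 := by omega
          exact this ▸ has
      rw [pvPopCount, if_neg hm, ih _ hlt _ hs']
      have hinj : Set.InjOn (· - 1) (s.erase 0 : Finset ℕ) := by
        intro a ha b hb hab
        have ha0 : a ≠ 0 := (Finset.mem_erase.mp ha).1
        have hb0 : b ≠ 0 := (Finset.mem_erase.mp hb).1
        simp only at hab
        omega
      rw [Finset.card_image_of_injOn hinj]
      have h0 : m % 2 = if 0 ∈ s then 1 else 0 := by
        have := hs 0
        rw [Nat.testBit_zero] at this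
        by_cases h : 0 ∈ s <;> simp [h] at this ⊢ <;> omega
      rw [h0]
      by_cases h : 0 ∈ s
      · rw [if_pos h, Finset.card_erase_of_mem h]
        have : 1 ≤ s.card := Finset.card_pos.mpr ⟨0, h⟩
        omega
      · rw [if_neg h, Finset.erase_eq_of_notMem h]
        omega

-- a number whose bits are exactly a nodup list of nonnegative ints has popcount = length
theorem pv_pop_eq_length (m : Nat) (L : List Int) (hnd : L.Nodup) (hnn : ∀ x ∈ L, 0 ≤ x)
    (hb : ∀ j : Nat, m.testBit j = true ↔ (j : Int) ∈ L) : pvPopCount m = L.length := by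
  have hmapnd : (L.map Int.toNat).Nodup := by
    refine List.Nodup.map_on ?_ hnd
    intro a ha b hb hab
    have := hnn a ha; have := hnn b hb; omega
  have hset : ∀ j, m.testBit j = true ↔ j ∈ (L.map Int.toNat).toFinset := by
    intro j
    rw [hb j, List.mem_toFinset, List.mem_map]
    constructor
    · intro h; exact ⟨(j : Int), h, by omega⟩
    · rintro ⟨x, hx, rfl⟩
      have := hnn x hx
      rwa [Int.toNat_of_nonneg this]
  rw [pv_pop_eq_card m _ hset, List.toFinset_card_of_nodup hmapnd, List.length_map]

set_option maxHeartbeats 1000000 in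
theorem pv_step_rel (a : Int × PySem.Set Int) (b : Int × Nat) (line : String) (h : pvRel a b) :
    pvRel (pvStepA a line) (pvStepB b line) := by
  obtain ⟨hk, hna, hfw, hbw⟩ := h
  set spl : List Int :=
    ((PySem.List.enumerate line.toList).filter (fun p => p.2 == '^')).map (·.1) with hspl
  have hsplnd : spl.Nodup := pv_spl_nodup line
  have hsplnn : ∀ x ∈ spl, 0 ≤ x := pv_spl_nonneg line
  set mask : Nat := (PySem.List.enumerate line.toList).foldl
    (fun (m : Nat) p => if p.2 == '^' then m ||| (1 <<< p.1.toNat) else m) 0 with hmask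
  have hmaskb : ∀ j : Nat, mask.testBit j = true ↔ (j : Int) ∈ spl := by
    intro j
    rw [hmask, pv_mask_bits_aux _ (fun p hp => by
      obtain ⟨k, hk', hpe⟩ := (PySem.List.mem_enumerate_iff _ _ _).mp hp
      subst hpe; simp) 0 j]
    simp [hspl]
  -- beams bits ↔ membership in a.2 (for nonnegative positions)
  have hbeam : ∀ j : Nat, b.2.testBit j = true ↔ (j : Int) ∈ a.2 := by
    intro j
    constructor
    · exact hbw j
    · intro hj
      rcases hfw _ hj with h | h
      · omega
      · simpa using h
  set hits := b.2 &&& mask with hhits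
  have hhitb : ∀ j : Nat, hits.testBit j = true ↔ ((j : Int) ∈ a.2 ∧ (j : Int) ∈ spl) := by
    intro j
    rw [hhits, Nat.testBit_and, Bool.and_eq_true, hbeam j, hmaskb j]
  obtain ⟨e1, e2, e3⟩ := pv_foldA spl a.2 PySem.Set.empty a.1 List.nodup_nil
  -- the split counts agree
  have hL : ∀ j : Nat, hits.testBit j = true ↔ (j : Int) ∈ a.2.filter (fun x => decide (x ∈ spl)) := by
    intro j
    rw [hhitb j, List.mem_filter]
    simp
  have hcount : pvPopCount hits = (a.2.filter (fun x => decide (x ∈ spl))).length := by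
    refine pv_pop_eq_length _ _ (hna.filter _) ?_ hL
    intro x hx
    exact hsplnn x (by simpa using (List.mem_filter.mp hx).2)
  refine ⟨?_, ?_, ?_, ?_⟩
  · show _ = b.1 + _
    rw [show (pvStepA a line).1 = a.1 + ((a.2.filter (fun x => decide (x ∈ spl))).length : Int) from e1]
    show _ = b.1 + (pvPopCount hits : Int)
    rw [hk, hcount]
  · exact e2
  · -- forward: every new beam of A is negative or a set bit of B's new beams
    intro x hx
    have hx' := (e3 x).mp hx
    simp only [PySem.Set.empty, List.not_mem_nil, false_or] at hx'
    obtain ⟨y, hy, hc⟩ := hx'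
    show x < 0 ∨ ((b.2 ^^^ hits) ||| (hits >>> 1) ||| (hits <<< 1)).testBit x.toNat = true
    rcases hc with ⟨hys, hxe⟩ | ⟨hyn, rfl⟩
    · -- y splits: y ≥ 0, hits bit y.toNat is set
      have hy0 : 0 ≤ y := hsplnn y hys
      have hyh : hits.testBit y.toNat = true := by
        rw [hhitb]
        constructor
        · rwa [Int.toNat_of_nonneg hy0]
        · rwa [Int.toNat_of_nonneg hy0]
      rcases hxe with rfl | rfl
      · by_cases hneg : y - 1 < 0
        · exact Or.inl hneg
        · right
          have hy1 : 1 ≤ y := by omega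
          rw [Nat.testBit_or, Nat.testBit_or, Nat.testBit_shiftRight]
          have : 1 + (y - 1).toNat = y.toNat := by omega
          rw [this, hyh]
          simp
      · right
        rw [Nat.testBit_or, Nat.testBit_shiftLeft]
        have h1 : (1 : Nat) ≤ (y + 1).toNat := by omega
        have h2 : (y + 1).toNat - 1 = y.toNat := by omega
        simp [h1, h2, hyh]
    · -- y does not split: carried over through the xor part
      by_cases hneg : x < 0
      · exact Or.inl hneg
      · right
        have hneg' : 0 ≤ x := by omega
        have hb2 : b.2.testBit x.toNat = true := by
          rcases hfw _ hy with h | h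
          · omega
          · exact h
        have hmb : mask.testBit x.toNat = false := by
          cases hmm : mask.testBit x.toNat
          · rfl
          · exfalso
            have h2 := (hmaskb x.toNat).mp hmm
            rw [Int.toNat_of_nonneg hneg'] at h2
            exact hyn h2
        have hhb : hits.testBit x.toNat = false := by
          rw [hhits, Nat.testBit_and, hmb]
          simp
        rw [Nat.testBit_or, Nat.testBit_or, Nat.testBit_xor, hb2, hhb]
        simp
  · -- backward: every set bit of B's new beams is a new beam of A
    intro j hj
    have hj0 : ((b.2 ^^^ hits) ||| (hits >>> 1) ||| (hits <<< 1)).testBit j = true := hj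
    rw [Nat.testBit_or, Nat.testBit_or] at hj0
    refine (e3 (j : Int)).mpr (Or.inr ?_)
    rcases Bool.or_eq_true_iff.mp hj0 with hj' | hj'
    · rcases Bool.or_eq_true_iff.mp hj' with hj'' | hj''
      · -- xor part: beam carried over, not a splitter hit
        rw [Nat.testBit_xor] at hj''
        have hb2 : b.2.testBit j = true := by
          rcases hb : b.2.testBit j
          · rw [hb] at hj''
            rcases hh : hits.testBit j
            · rw [hh] at hj''; simp at hj''
            · have := (hhitb j).mp hh
              have := (hbeam j).mpr this.1
              rw [this] at hb; cases hb
          · rfl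
        have hya : (j : Int) ∈ a.2 := (hbeam j).mp hb2
        have hhb : hits.testBit j = false := by
          rcases hh : hits.testBit j
          · rfl
          · rw [hb2, hh] at hj''; simp at hj''
        have hns : (j : Int) ∉ spl := by
          intro hcon
          have : hits.testBit j = true := (hhitb j).mpr ⟨hya, hcon⟩
          rw [this] at hhb; cases hhb
        exact ⟨(j : Int), hya, Or.inr ⟨hns, rfl⟩⟩
      · -- hits >> 1: a splitter at j+1 produced a beam at j
        rw [Nat.testBit_shiftRight] at hj''
        have := (hhitb (1 + j)).mp hj''
        refine ⟨((1 + j : Nat) : Int), this.1, Or.inl ⟨this.2, Or.inl (by push_cast; ring)⟩⟩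
    · -- hits << 1: a splitter at j-1 produced a beam at j
      rw [Nat.testBit_shiftLeft] at hj'
      rcases Bool.and_eq_true_iff.mp hj' with ⟨h1, h2⟩
      have h1' : 1 ≤ j := by simpa using h1
      have := (hhitb (j - 1)).mp h2
      refine ⟨((j - 1 : Nat) : Int), this.1, Or.inl ⟨this.2, Or.inr (by omega)⟩⟩

theorem pv_fold_rel (lines : List String) : ∀ (a : Int × PySem.Set Int) (b : Int × Nat),
    pvRel a b → pvRel (lines.foldl pvStepA a) (lines.foldl pvStepB b) := by
  induction lines with
  | nil => exact fun a b h => h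
  | cons l t ih => exact fun a b h => ih _ _ (pv_step_rel a b l h)

theorem pv_init_rel (start : Int) :
    pvRel (0, PySem.Set.ofList [start]) (0, if start < 0 then 0 else 1 <<< start.toNat) := by
  refine ⟨rfl, PySem.Set.nodup_ofList _, ?_, ?_⟩
  · intro x hx
    have hx' : x = start := by simpa [PySem.Set.ofList] using hx
    subst hx'
    by_cases h : x < 0
    · exact Or.inl h
    · right
      rw [if_neg h, Nat.shiftLeft_eq, one_mul, Nat.testBit_two_pow]
      simp
  · intro j hj
    by_cases h : start < 0
    · rw [if_pos h] at hj
      simp [Nat.zero_testBit] at hj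
    · rw [if_neg h, Nat.shiftLeft_eq, one_mul, Nat.testBit_two_pow] at hj
      have : start.toNat = j := by simpa using hj
      have : start = (j : Int) := by omega
      simp [PySem.Set.ofList, this]

-- ===== VERDICT (by name: the statement is the Claim_ definition above) =====
theorem part_1_spec : Claim_equal_part_1 := by
  intro diagram _ _
  unfold Spec_part_1
  rw [part_1_eq_fold, part_1_alt_eq_fold]
  exact (pv_fold_rel _ _ _ (pv_init_rel _)).1
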